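-- pv_equiv track=rewrite | github.com/u-t-autonomous/PX4_ROS_packages | reactive_test/src/static_env_controller.py | set_value_after_steps
-- ===== SOURCE A (Python) =====
-- def set_value_after_steps( n_steps , value):
-- 	res = []
-- 	for step in range(n_steps):
-- 		res_temp = ''
-- 		for i in range(step+1):
-- 			res_temp += 'X ( '
-- 		res_temp += value
-- 		for i in range(step+1):
-- 			res_temp += ')'
-- 		res.append(res_temp)
-- 	return ' || '.join(res)
-- ===== SOURCE B (Python) =====
-- def set_value_after_steps(n_steps, value):
--     parts = []
--     prefix = ''
--     suffix = ''
--     for _ in range(n_steps):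
--         prefix += 'X ( '
--         suffix += ')'
--         parts.append(prefix + value + suffix)
--     return ' || '.join(parts)
-- ===== Notes on version B (the rewrite author's own statement) =====
-- stated objective: alternative
-- what changed: Single pass carrying running prefix/suffix accumulators instead of rebuilding the 'X ( ' and ')' wrappers from scratch with nested inner loops at every step.
import Mathlib
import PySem

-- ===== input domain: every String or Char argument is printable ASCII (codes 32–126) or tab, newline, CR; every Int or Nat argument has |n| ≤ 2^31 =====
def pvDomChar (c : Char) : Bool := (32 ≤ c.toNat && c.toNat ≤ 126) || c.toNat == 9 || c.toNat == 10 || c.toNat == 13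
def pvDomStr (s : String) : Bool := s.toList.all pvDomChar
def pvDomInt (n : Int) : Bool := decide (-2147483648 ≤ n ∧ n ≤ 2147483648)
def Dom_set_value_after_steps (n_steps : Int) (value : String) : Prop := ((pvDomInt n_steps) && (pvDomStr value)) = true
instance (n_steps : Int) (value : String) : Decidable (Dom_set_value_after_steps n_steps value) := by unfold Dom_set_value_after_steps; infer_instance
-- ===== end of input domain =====

-- B replaces A's per-step inner rebuild loops by one pass carrying running prefix/suffix accumulators (objective: alternative decomposition).

-- ===== PORT A =====
def set_value_after_steps (n_steps : Int) (value : String) : String :=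
  let res : List String :=
    (PySem.List.pyRange 0 n_steps 1).foldl (fun res step =>
      let res_temp := (PySem.List.pyRange 0 (step + 1) 1).foldl (fun s _ => s ++ "X ( ") ""
      let res_temp := res_temp ++ value
      let res_temp := (PySem.List.pyRange 0 (step + 1) 1).foldl (fun s _ => s ++ ")") res_temp
      res ++ [res_temp]) []
  PySem.Str.join " || " res

-- ===== PORT B =====
def set_value_after_steps_alt (n_steps : Int) (value : String) : String :=
  let st :=
    (PySem.List.pyRange 0 n_steps 1).foldl
      (fun (st : List String × String × String) _ =>
        let parts := st.1
        let pre := st.2.1 ++ "X ( "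
        let suf := st.2.2 ++ ")"
        (parts ++ [pre ++ value ++ suf], pre, suf))
      ([], "", "")
  PySem.Str.join " || " st.1

-- ===== PRECONDITION & SPEC =====
def Spec_set_value_after_steps (n_steps : Int) (value : String) (out : String) : Prop := out = set_value_after_steps_alt n_steps value
instance (n_steps : Int) (value : String) (out : String) : Decidable (Spec_set_value_after_steps n_steps value out) := by unfold Spec_set_value_after_steps; infer_instance

-- ===== CLAIM (what is proved, stated in full; the proofs are below) =====
def Claim_equal_set_value_after_steps : Prop := ∀ (n_steps : Int) (value : String), Dom_set_value_after_steps n_steps value → Spec_set_value_after_steps n_steps value (set_value_after_steps n_steps value)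

-- ===== LEMMAS AND PROOFS =====

-- n-fold repetition of a string, appended on the right
def pvRep (t : String) : Nat → String
  | 0 => ""
  | n + 1 => pvRep t n ++ t

-- a fold that appends a constant string once per element depends only on the length
theorem pvFoldConst (t : String) (l : List Int) (init : String) :
    l.foldl (fun s _ => s ++ t) init = init ++ pvRep t l.length := by
  induction l generalizing init with
  | nil => simp [pvRep]
  | cons x xs ih =>
      simp only [List.foldl_cons, List.length_cons, ih]
      -- init ++ t ++ pvRep t xs.length = init ++ pvRep t (xs.length + 1)
      induction xs.length generalizing init with
      | zero => simp [pvRep]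
      | succ n ihn =>
          simp only [pvRep] at *
          rw [← String.append_assoc, ← String.append_assoc]
          rw [show (init ++ t) ++ pvRep t n = init ++ pvRep t (n+1) from by
                have := ihn init; simpa [pvRep] using this]
          simp [pvRep, String.append_assoc]

-- the k-th element produced by either program
def pvElem (value : String) (k : Nat) : String :=
  pvRep "X ( " (k + 1) ++ value ++ pvRep ")" (k + 1)

-- A's accumulated list over the first n steps
theorem pvA_list (value : String) (n : Nat) :
    (PySem.List.pyRange 0 (n : Int) 1).foldl (fun res step =>
      let res_temp := (PySem.List.pyRange 0 (step + 1) 1).foldl (fun s _ => s ++ "X ( ") ""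
      let res_temp := res_temp ++ value
      let res_temp := (PySem.List.pyRange 0 (step + 1) 1).foldl (fun s _ => s ++ ")") res_temp
      res ++ [res_temp]) []
    = (List.range n).map (pvElem value) := by
  induction n with
  | zero => simp [PySem.List.pyRange_one_eq_nil]
  | succ n ih =>
      have hsplit : PySem.List.pyRange 0 ((n : Int) + 1) 1
          = PySem.List.pyRange 0 (n : Int) 1 ++ [(n : Int)] :=
        PySem.List.pyRange_one_succ_right (by positivity)
      push_cast
      rw [hsplit, List.foldl_append, ih]
      simp only [List.foldl_cons, List.foldl_nil]
      rw [List.range_succ, List.map_append]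
      congr 1
      simp only [List.map_singleton, pvElem]
      rw [pvFoldConst, pvFoldConst]
      have hlen : (PySem.List.pyRange 0 ((n : Int) + 1) 1).length = n + 1 := by
        rw [PySem.List.length_pyRange_one]; omega
      rw [hlen, String.empty_append, String.append_assoc]

-- B's accumulated state over the first n steps
theorem pvB_state (value : String) (n : Nat) :
    (PySem.List.pyRange 0 (n : Int) 1).foldl
      (fun (st : List String × String × String) _ =>
        let parts := st.1
        let pre := st.2.1 ++ "X ( "
        let suf := st.2.2 ++ ")"
        (parts ++ [pre ++ value ++ suf], pre, suf))
      ([], "", "")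
    = ((List.range n).map (pvElem value), pvRep "X ( " n, pvRep ")" n) := by
  induction n with
  | zero => simp [PySem.List.pyRange_one_eq_nil, pvRep]
  | succ n ih =>
      have hsplit : PySem.List.pyRange 0 ((n : Int) + 1) 1
          = PySem.List.pyRange 0 (n : Int) 1 ++ [(n : Int)] :=
        PySem.List.pyRange_one_succ_right (by positivity)
      push_cast
      rw [hsplit, List.foldl_append, ih]
      simp only [List.foldl_cons, List.foldl_nil]
      rw [List.range_succ, List.map_append]
      simp [pvElem, pvRep, String.append_assoc]

-- negative n_steps: the range is empty in both ports
theorem pv_neg (n_steps : Int) (value : String) (h : n_steps ≤ 0) :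
    set_value_after_steps n_steps value = set_value_after_steps_alt n_steps value := by
  simp [set_value_after_steps, set_value_after_steps_alt, PySem.List.pyRange_one_eq_nil h]

-- ===== VERDICT (by name: the statement is the Claim_ definition above) =====
theorem set_value_after_steps_spec : Claim_equal_set_value_after_steps := by
  intro n_steps value _
  show set_value_after_steps n_steps value = set_value_after_steps_alt n_steps value
  rcases (by omega : n_steps ≤ 0 ∨ 0 < n_steps) with h | h
  · exact pv_neg n_steps value h
  · have hn : n_steps = ((n_steps.toNat : Nat) : Int) := by omega
    rw [hn]
    unfold set_value_after_steps set_value_after_steps_alt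
    simp only [pvA_list value n_steps.toNat, pvB_state value n_steps.toNat]
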